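-- pv_equiv track=rewrite | github.com/mahanhrgowda/soul-connections | app.py | calculate_life_path
-- ===== SOURCE A (Python) =====
-- def calculate_life_path(day, month, year):
--     def reduce(num):
--         while num > 9 and num not in [11, 22, 33]:
--             num = sum(int(d) for d in str(num))
--         return num
--     day_red = reduce(day)
--     month_red = reduce(month)
--     year_red = reduce(year)
--     total = reduce(day_red + month_red + year_red)
--     return total
-- ===== SOURCE B (Python) =====
-- def calculate_life_path(day, month, year):
--     def digit_sum(n):
--         s = 0
--         while n > 0:
--             s += n % 10
--             n //= 10
--         return s
--
--     def reduce(n):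
--         if n <= 9 or n in (11, 22, 33):
--             return n
--         return reduce(digit_sum(n))
--
--     return reduce(reduce(day) + reduce(month) + reduce(year))
-- ===== Notes on version B (the rewrite author's own statement) =====
-- stated objective: alternative
-- what changed: The reducer is recursive instead of a while loop, and the digit sum is computed by mod-10/floor-division arithmetic instead of converting the number to a string and parsing each character back to an int.
import Mathlib
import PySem

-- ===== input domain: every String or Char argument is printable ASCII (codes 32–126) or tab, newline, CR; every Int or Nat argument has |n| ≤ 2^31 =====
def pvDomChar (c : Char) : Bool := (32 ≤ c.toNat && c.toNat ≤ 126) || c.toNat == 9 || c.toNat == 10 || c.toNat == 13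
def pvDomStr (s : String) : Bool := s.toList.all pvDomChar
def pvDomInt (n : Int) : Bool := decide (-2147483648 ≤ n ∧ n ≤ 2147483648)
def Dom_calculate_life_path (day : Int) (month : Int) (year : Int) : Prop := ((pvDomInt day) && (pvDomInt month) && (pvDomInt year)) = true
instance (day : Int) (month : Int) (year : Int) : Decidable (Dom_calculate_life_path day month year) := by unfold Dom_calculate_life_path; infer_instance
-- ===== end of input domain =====

-- B replaces A's while-loop reducer by a recursive reducer whose digit sum is computed by
-- mod-10 / floor-division arithmetic instead of string conversion (objective: alternative).
-- Both loops are ported with a Nat fuel argument (a totality guard only: fuel num.toNat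
-- always suffices, since each step strictly shrinks a positive num).

-- ===== PORT A =====
-- int(d) for a single character d (inside the loop num > 9, so d is always a digit; getD 0 is unreachable)
def pvCharVal (c : Char) : Int := (PySem.Int.ofChars? [c]).getD 0
-- sum(int(d) for d in str(num))
def pvStrDigitSum (num : Int) : Int := ((PySem.Int.toChars num).map pvCharVal).sum

-- while num > 9 and num not in [11, 22, 33]: num = sum(int(d) for d in str(num))
def pvReduceAGo : Nat → Int → Int
  | 0, num => num
  | fuel + 1, num =>
    if 9 < num ∧ ¬ (num ∈ ([11, 22, 33] : List Int)) then
      pvReduceAGo fuel (pvStrDigitSum num)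
    else num

def pvReduceA (num : Int) : Int := pvReduceAGo num.toNat num

def calculate_life_path (day : Int) (month : Int) (year : Int) : Int :=
  let day_red := pvReduceA day
  let month_red := pvReduceA month
  let year_red := pvReduceA year
  pvReduceA (day_red + month_red + year_red)

-- ===== PORT B =====
-- digit_sum's while loop: s accumulates n % 10 while n //= 10
def pvDigitSumGo : Nat → Int → Int → Int
  | 0, _, s => s
  | fuel + 1, n, s =>
    if 0 < n then pvDigitSumGo fuel (PySem.Int.floordiv n 10) (s + PySem.Int.mod n 10)
    else s

def pvDigitSum (n : Int) : Int := pvDigitSumGo n.toNat n 0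

-- reduce(n): return n if n <= 9 or n in (11, 22, 33), else recurse on digit_sum(n)
def pvReduceBGo : Nat → Int → Int
  | 0, n => n
  | fuel + 1, n =>
    if n ≤ 9 ∨ n = 11 ∨ n = 22 ∨ n = 33 then n
    else pvReduceBGo fuel (pvDigitSum n)

def pvReduceB (n : Int) : Int := pvReduceBGo n.toNat n

def calculate_life_path_alt (day : Int) (month : Int) (year : Int) : Int :=
  pvReduceB (pvReduceB day + pvReduceB month + pvReduceB year)

-- ===== PRECONDITION & SPEC =====
def Spec_calculate_life_path (day : Int) (month : Int) (year : Int) (out : Int) : Prop := out = calculate_life_path_alt day month year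
instance (day : Int) (month : Int) (year : Int) (out : Int) : Decidable (Spec_calculate_life_path day month year out) := by unfold Spec_calculate_life_path; infer_instance

-- ===== CLAIM (what is proved, stated in full; the proofs are below) =====
def Claim_equal_calculate_life_path : Prop := ∀ (day : Int) (month : Int) (year : Int), Dom_calculate_life_path day month year → Spec_calculate_life_path day month year (calculate_life_path day month year)

-- ===== LEMMAS AND PROOFS =====
lemma pvCharVal_digitChar (d : Nat) (h : d < 10) : pvCharVal (Nat.digitChar d) = (d : Int) := by
  interval_cases d <;> decide

lemma pvCore_sum (fuel : Nat) : ∀ (n : Nat) (acc : List Char), n < fuel →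
    ((Nat.toDigitsCore 10 fuel n acc).map pvCharVal).sum
      = ((Nat.digits 10 n).sum : Int) + ((acc.map pvCharVal).sum) := by
  induction fuel with
  | zero => intro n acc h; omega
  | succ f ih =>
    intro n acc h
    simp only [Nat.toDigitsCore]
    by_cases h0 : n / 10 = 0
    · simp only [h0, if_true]
      rcases Nat.eq_zero_or_pos n with hn | hn
      · subst hn; simp [pvCharVal_digitChar 0 (by norm_num)]
      · rw [Nat.digits_def' (by norm_num : (1:Nat) < 10) hn, h0]
        have hlt : n % 10 < 10 := Nat.mod_lt _ (by norm_num)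
        simp [pvCharVal_digitChar _ hlt]
    · simp only [h0, if_false]
      have hn10 : 10 ≤ n := by
        by_contra hc
        exact h0 (Nat.div_eq_of_lt (by omega))
      have hfl : n / 10 < f := by
        have := Nat.div_lt_self (by omega : 0 < n) (by norm_num : 1 < 10)
        omega
      rw [ih (n / 10) _ hfl]
      have hlt : n % 10 < 10 := Nat.mod_lt _ (by norm_num)
      rw [Nat.digits_def' (by norm_num : (1:Nat) < 10) (by omega : 0 < n)]
      simp [pvCharVal_digitChar _ hlt]
      ring

lemma pvStrDigitSum_eq_digits (n : Int) (h : 0 ≤ n) :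
    pvStrDigitSum n = ((Nat.digits 10 n.toNat).sum : Int) := by
  unfold pvStrDigitSum
  rw [show PySem.Int.toChars n = Nat.toDigits 10 n.toNat by
        simp [PySem.Int.toChars, not_lt.mpr h]]
  unfold Nat.toDigits
  rw [pvCore_sum (n.toNat + 1) n.toNat [] (by omega)]
  simp

lemma pvDigitsSum_lt (m : Nat) (h : 10 ≤ m) : (Nat.digits 10 m).sum < m := by
  rw [Nat.digits_def' (by norm_num : (1:Nat) < 10) (by omega : 0 < m)]
  have h1 := Nat.digit_sum_le 10 (m / 10)
  have h2 := Nat.mod_add_div m 10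
  have h3 : 1 ≤ m / 10 := Nat.le_div_iff_mul_le (by norm_num) |>.mpr (by omega)
  simp only [List.sum_cons]
  omega

lemma pvDigitSumGo_eq_digits (fuel : Nat) : ∀ (n s : Int), 0 ≤ n → n.toNat ≤ fuel →
    pvDigitSumGo fuel n s = s + ((Nat.digits 10 n.toNat).sum : Int) := by
  induction fuel with
  | zero =>
    intro n s hn hf
    have h0 : n = 0 := by omega
    subst h0
    simp [pvDigitSumGo]
  | succ f ih =>
    intro n s hn hf
    rw [pvDigitSumGo]
    by_cases h : 0 < n
    · simp only [h, if_true]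
      rw [PySem.Int.floordiv_eq_ediv_of_pos (by norm_num : (0:Int) < 10),
          PySem.Int.mod_eq_emod_of_pos (by norm_num : (0:Int) < 10)]
      have h2 : 0 ≤ n / 10 := by omega
      have h3 : (n / 10).toNat ≤ f := by omega
      rw [ih (n / 10) _ h2 h3]
      rw [Nat.digits_def' (by norm_num : (1:Nat) < 10) (by omega : 0 < n.toNat)]
      have e1 : (n / 10).toNat = n.toNat / 10 := by omega
      have e2 : n % 10 = ((n.toNat % 10 : Nat) : Int) := by omega
      rw [e1, e2]
      simp only [List.sum_cons]
      push_cast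
      ring
    · simp only [h, if_false]
      have h0 : n = 0 := by omega
      subst h0
      simp
lemma pvDigitSum_lt (n : Int) (h : 9 < n) :
    0 ≤ pvDigitSum n ∧ pvDigitSum n < n := by
  unfold pvDigitSum
  rw [pvDigitSumGo_eq_digits n.toNat n 0 (by omega) (by omega)]
  have := pvDigitsSum_lt n.toNat (by omega)
  constructor
  · positivity
  · omega

lemma pvSum_eq (n : Int) (h : 9 < n) : pvStrDigitSum n = pvDigitSum n := by
  rw [pvStrDigitSum_eq_digits n (by omega)]
  unfold pvDigitSum
  rw [pvDigitSumGo_eq_digits n.toNat n 0 (by omega) (by omega)]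
  ring

lemma pvReduceGo_eq (fuel : Nat) : ∀ (n : Int), n.toNat ≤ fuel →
    pvReduceAGo fuel n = pvReduceBGo fuel n := by
  induction fuel with
  | zero => intro n _; rfl
  | succ f ih =>
    intro n hf
    rw [pvReduceAGo, pvReduceBGo]
    by_cases h : 9 < n ∧ ¬ (n ∈ ([11, 22, 33] : List Int))
    · have hm : n ≠ 11 ∧ n ≠ 22 ∧ n ≠ 33 := by simpa using h.2
      have hb : ¬ (n ≤ 9 ∨ n = 11 ∨ n = 22 ∨ n = 33) := by
        have h9 := h.1
        omega
      rw [if_pos h, if_neg hb, pvSum_eq n h.1]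
      have hlt := pvDigitSum_lt n h.1
      exact ih (pvDigitSum n) (by omega)
    · have hb : n ≤ 9 ∨ n = 11 ∨ n = 22 ∨ n = 33 := by
        rcases not_and_or.mp h with h1 | h2
        · left; omega
        · have hm := not_not.mp h2
          simp only [List.mem_cons, List.not_mem_nil, or_false] at hm
          omega
      rw [if_neg h, if_pos hb]

lemma pvReduce_eq (n : Int) : pvReduceA n = pvReduceB n :=
  pvReduceGo_eq n.toNat n le_rfl

-- ===== VERDICT (by name: the statement is the Claim_ definition above) =====
theorem calculate_life_path_spec : Claim_equal_calculate_life_path := by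
  intro day month year _
  unfold Spec_calculate_life_path calculate_life_path calculate_life_path_alt
  simp only [pvReduce_eq]
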